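-- pv_equiv track=rewrite | github.com/miskaone/Multi-Agent_RAG_Refactor_Bot | src/refactor_bot/utils/diff_generator.py | detect_code_style
-- ===== SOURCE A (Python) =====
-- def detect_code_style(source_code: str) -> dict[str, str]:
--     """Detect code style conventions from source code.
--
--     Args:
--         source_code: The source code to analyse.
--
--     Returns:
--         Dict with keys:
--             "indent": e.g. "2 spaces", "4 spaces", "tabs"
--             "quotes": "single" or "double"
--     """
--     # Default values
--     indent_style = "4 spaces"
--     quote_style = "double"
--
--     # Return defaults for empty source
--     if not source_code:
--         return {"indent": indent_style, "quotes": quote_style}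
--
--     # Detect indentation
--     indent_counts: dict[int, int] = {}
--     lines = source_code.splitlines()
--
--     for line in lines:
--         if not line or not line[0].isspace():
--             continue
--
--         # Count leading spaces
--         spaces = 0
--         for char in line:
--             if char == " ":
--                 spaces += 1
--             elif char == "\t":
--                 # Found a tab - assume tabs
--                 indent_style = "tabs"
--                 break
--             else:
--                 break
--
--         if indent_style == "tabs":
--             break
--
--         if spaces > 0:
--             indent_counts[spaces] = indent_counts.get(spaces, 0) + 1
--
--     # If we didn't find tabs, determine most common space indent
--     if indent_style != "tabs" and indent_counts:
--         # Find the smallest non-zero indent level (likely the base indent)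
--         base_indent = min(indent_counts.keys())
--         indent_style = f"{base_indent} spaces"
--
--     # Detect quotes
--     single_quote_count = source_code.count("'")
--     double_quote_count = source_code.count('"')
--
--     if single_quote_count > double_quote_count:
--         quote_style = "single"
--     else:
--         quote_style = "double"
--
--     return {"indent": indent_style, "quotes": quote_style}
-- ===== SOURCE B (Python) =====
-- def detect_code_style(source_code: str) -> dict[str, str]:
--     if not source_code:
--         return {"indent": "4 spaces", "quotes": "double"}
--     lines = source_code.splitlines()
--     if any(line.lstrip(' ').startswith('\t') for line in lines):
--         indent = "tabs"
--     else:
--         widths = [len(line) - len(line.lstrip(' ')) for line in lines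
--                   if line.startswith(' ')]
--         indent = f"{min(widths)} spaces" if widths else "4 spaces"
--     quotes = "single" if source_code.count("'") > source_code.count('"') else "double"
--     return {"indent": indent, "quotes": quotes}
-- ===== Notes on version B (the rewrite author's own statement) =====
-- stated objective: simpler
-- what changed: Replaces the stateful line loop (char-by-char counter, early break, width-frequency dict, min over dict keys) by a decomposition into an any-pass for tabs and, failing that, a comprehension of leading-space widths with a plain min.
import Mathlib
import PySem

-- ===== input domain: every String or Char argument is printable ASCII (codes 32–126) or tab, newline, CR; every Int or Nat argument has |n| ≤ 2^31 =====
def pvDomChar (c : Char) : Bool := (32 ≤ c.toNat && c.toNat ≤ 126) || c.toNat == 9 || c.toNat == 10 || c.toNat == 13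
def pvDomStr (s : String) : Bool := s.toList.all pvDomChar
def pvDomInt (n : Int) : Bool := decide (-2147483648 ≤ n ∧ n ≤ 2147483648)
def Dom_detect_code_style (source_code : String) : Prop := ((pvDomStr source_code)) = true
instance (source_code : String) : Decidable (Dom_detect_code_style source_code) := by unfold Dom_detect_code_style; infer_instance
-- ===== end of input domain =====

-- B replaces A's stateful line loop (char counter, early break, width dict, min over keys)
-- by an any-pass for tabs and a comprehension of leading-space widths with a plain min (objective: simpler).

-- ===== PORT A =====
-- inner `for char in line` loop: count leading spaces, stop with a tab flag
def pvCountLead (cs : List Char) (spaces : Int) : Int × Bool :=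
  match cs with
  | [] => (spaces, false)
  | c :: rest =>
    if c = ' ' then pvCountLead rest (spaces + 1)
    else if c = '\t' then (spaces, true)
    else (spaces, false)

-- outer `for line in lines` loop: state (indent_style, indent_counts), early break on tabs
def pvIndentLoop (lines : List String) (style : String) (counts : PySem.Dict Int Int) :
    String × PySem.Dict Int Int :=
  match lines with
  | [] => (style, counts)
  | line :: rest =>
    match line.toList with
    | [] => pvIndentLoop rest style counts
    | c :: _ =>
      if !(PySem.Chars.isspace c) then pvIndentLoop rest style counts
      else
        let p := pvCountLead line.toList 0
        let style' := if p.2 then "tabs" else style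
        if style' = "tabs" then (style', counts)
        else if p.1 > 0 then
          pvIndentLoop rest style' (counts.insert p.1 (counts.getD p.1 0 + 1))
        else pvIndentLoop rest style' counts

def detect_code_style (source_code : String) : List (String × String) :=
  if source_code = "" then [("indent", "4 spaces"), ("quotes", "double")]
  else
    let lines := PySem.Str.splitlines source_code
    let sc := pvIndentLoop lines "4 spaces" PySem.Dict.empty
    let indent :=
      if sc.1 ≠ "tabs" ∧ sc.2.keys ≠ [] then
        match PySem.List.min? sc.2.keys (fun x => x) with
        | some m => PySem.Int.toStr m ++ " spaces"
        | none => sc.1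
      else sc.1
    let quotes :=
      if PySem.Str.count source_code "'" > PySem.Str.count source_code "\"" then "single"
      else "double"
    [("indent", indent), ("quotes", quotes)]

-- ===== PORT B =====
-- line.lstrip(' ') ported by hand: exact, since lstrip(' ') drops exactly the leading spaces
def pvLstripSpace (cs : List Char) : List Char := cs.dropWhile (· == ' ')

-- line.lstrip(' ').startswith('\t')
def pvTabLine (l : String) : Bool := PySem.Chars.startswith (pvLstripSpace l.toList) ['\t']

-- len(line) - len(line.lstrip(' '))
def pvWidth (l : String) : Int := PySem.Str.len l - PySem.Chars.len (pvLstripSpace l.toList)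

def detect_code_style_alt (source_code : String) : List (String × String) :=
  if source_code = "" then [("indent", "4 spaces"), ("quotes", "double")]
  else
    let lines := PySem.Str.splitlines source_code
    let indent :=
      if lines.any pvTabLine then "tabs"
      else
        let widths := (lines.filter (fun l => PySem.Str.startswith l " ")).map pvWidth
        match PySem.List.min? widths (fun x => x) with
        | some m => PySem.Int.toStr m ++ " spaces"
        | none => "4 spaces"
    let quotes :=
      if PySem.Str.count source_code "'" > PySem.Str.count source_code "\"" then "single"
      else "double"
    [("indent", indent), ("quotes", quotes)]

-- ===== PRECONDITION & SPEC =====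
def Spec_detect_code_style (source_code : String) (out : List (String × String)) : Prop := out = detect_code_style_alt source_code
instance (source_code : String) (out : List (String × String)) : Decidable (Spec_detect_code_style source_code out) := by unfold Spec_detect_code_style; infer_instance

-- ===== CLAIM (what is proved, stated in full; the proofs are below) =====
def Claim_equal_detect_code_style : Prop := ∀ (source_code : String), Dom_detect_code_style source_code → Spec_detect_code_style source_code (detect_code_style source_code)

-- ===== LEMMAS AND PROOFS =====

-- characterisation of A's inner loop by takeWhile/dropWhile
theorem pvCountLead_eq (cs : List Char) (a : Int) :
    pvCountLead cs a = (a + ((cs.takeWhile (· == ' ')).length : Int),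
      decide ((cs.dropWhile (· == ' ')).head? = some '\t')) := by
  induction cs generalizing a with
  | nil => simp [pvCountLead]
  | cons c rest ih =>
    by_cases hc : c = ' '
    · subst hc
      simp only [pvCountLead, ih, List.takeWhile_cons, List.dropWhile_cons]
      simp
      omega
    · by_cases ht : c = '\t'
      · subst ht
        simp [pvCountLead]
      · simp [pvCountLead, hc, ht]

theorem pvTabLine_iff (l : String) :
    pvTabLine l = true ↔ ((l.toList.dropWhile (· == ' ')).head? = some '\t') := by
  unfold pvTabLine pvLstripSpace
  rw [PySem.Chars.startswith_iff]
  cases h : l.toList.dropWhile (· == ' ') with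
  | nil => simp
  | cons x xs => simp [List.prefix_cons_iff]; exact eq_comm

theorem pvWidth_eq (l : String) :
    pvWidth l = ((l.toList.takeWhile (· == ' ')).length : Int) := by
  unfold pvWidth pvLstripSpace
  have h := congrArg List.length (List.takeWhile_append_dropWhile (p := (· == ' ')) (l := l.toList))
  simp only [List.length_append] at h
  simp only [PySem.Str.len, PySem.Chars.len_eq]
  omega

theorem pvStartswithSpace (l : String) :
    PySem.Str.startswith l " " = true ↔ l.toList.head? = some ' ' := by
  rw [show PySem.Str.startswith l " " = PySem.Chars.startswith l.toList " ".toList from by simp,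
    PySem.Chars.startswith_iff]
  cases h : l.toList with
  | nil => simp
  | cons x xs => simp [List.prefix_cons_iff]; exact eq_comm

-- if some line has a tab after its leading spaces, A's loop ends with style "tabs"
theorem pvIndentLoop_tabs (lines : List String) (d : PySem.Dict Int Int)
    (h : lines.any pvTabLine = true) :
    (pvIndentLoop lines "4 spaces" d).1 = "tabs" := by
  induction lines generalizing d with
  | nil => simp at h
  | cons line rest ih =>
    rw [List.any_cons, Bool.or_eq_true] at h
    cases hl : line.toList with
    | nil =>
      simp only [pvIndentLoop, hl]
      apply ih
      rcases h with h | h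
      · rw [pvTabLine_iff, hl] at h; simp at h
      · exact h
    | cons c cs =>
      simp only [pvIndentLoop, hl]
      by_cases hsp : PySem.Chars.isspace c = true
      · simp only [hsp, Bool.not_true, Bool.false_eq_true, if_false]
        rw [pvCountLead_eq]
        by_cases htab : ((line.toList.dropWhile (· == ' ')).head? = some '\t')
        · simp [hl] at htab ⊢
          simp [htab]
        · have hnt : pvTabLine line = false := by
            rw [← Bool.not_eq_true, pvTabLine_iff]; exact htab
          have h' : rest.any pvTabLine = true := by
            rcases h with h | h
            · rw [hnt] at h; simp at h
            · exact h
          simp only [hl] at htab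
          rw [decide_eq_false htab]
          simp only [Bool.false_eq_true, if_false]
          rw [if_neg (show ¬("4 spaces" : String) = "tabs" from by decide)]
          split_ifs with h1 <;> exact ih _ h'
      · have hnt : pvTabLine line = false := by
          rw [← Bool.not_eq_true, pvTabLine_iff, hl]
          simp only [List.dropWhile_cons]
          have hcs : (c == ' ') = false := by
            by_contra hh
            simp at hh; subst hh; simp [PySem.Chars.isspace] at hsp
          have hct : c ≠ '\t' := by
            intro hh; subst hh; simp [PySem.Chars.isspace] at hsp
          simp [hcs, hct]
        have h' : rest.any pvTabLine = true := by
          rcases h with h | h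
          · rw [hnt] at h; simp at h
          · exact h
        simp only [hsp, Bool.not_false, if_true]
        exact ih _ h'

-- with no tab anywhere, A's loop keeps style "4 spaces" and builds the width-count dict
theorem pvIndentLoop_noTabs (lines : List String) (d : PySem.Dict Int Int)
    (h : lines.any pvTabLine = false) :
    pvIndentLoop lines "4 spaces" d =
      ("4 spaces",
        ((lines.filter (fun l => PySem.Str.startswith l " ")).map pvWidth).foldl
          (fun d w => d.insert w (d.getD w 0 + 1)) d) := by
  induction lines generalizing d with
  | nil => simp [pvIndentLoop]
  | cons line rest ih =>
    rw [List.any_cons, Bool.or_eq_false_iff] at h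
    obtain ⟨h1, h2⟩ := h
    have htab : ¬ ((line.toList.dropWhile (· == ' ')).head? = some '\t') := by
      rw [← pvTabLine_iff]; simp [h1]
    cases hl : line.toList with
    | nil =>
      have hsw : PySem.Str.startswith line " " = false := by
        rw [← Bool.not_eq_true, pvStartswithSpace, hl]; simp
      simp only [pvIndentLoop, hl, List.filter_cons, hsw]
      simp only [Bool.false_eq_true, if_false]
      exact ih _ h2
    | cons c cs =>
      simp only [pvIndentLoop, hl]
      by_cases hsp : PySem.Chars.isspace c = true
      · simp only [hsp, Bool.not_true, Bool.false_eq_true, if_false]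
        rw [pvCountLead_eq]
        simp only [hl] at htab
        simp only [decide_eq_false htab, Bool.false_eq_true, if_false]
        have hns : ¬ (("4 spaces" : String) = "tabs") := by simp
        rw [if_neg hns]
        by_cases hc : c = ' '
        · subst hc
          have hsw : PySem.Str.startswith line " " = true := by
            rw [pvStartswithSpace, hl]; rfl
          have hpos : ((( ' ' :: cs).takeWhile (· == ' ')).length : Int) > 0 := by
            simp
          rw [if_pos (by simpa using hpos)]
          have hkey : pvWidth line = 0 + ((( ' ' :: cs).takeWhile (· == ' ')).length : Int) := by
            rw [pvWidth_eq, hl]; omega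
          simp only [List.filter_cons, hsw, if_true, List.map_cons, List.foldl_cons]
          rw [ih _ h2, ← hkey]
        · have hsw : PySem.Str.startswith line " " = false := by
            rw [← Bool.not_eq_true, pvStartswithSpace, hl]
            simp; intro hh; exact hc hh
          have hz : (((c :: cs).takeWhile (· == ' ')).length : Int) = 0 := by
            have : (c == ' ') = false := by simp [hc]
            simp [this]
          rw [show (0 : Int) + (((c :: cs).takeWhile (· == ' ')).length : Int) = 0 from by omega]
          simp only [gt_iff_lt, lt_irrefl, if_false]
          simp only [List.filter_cons, hsw, Bool.false_eq_true, if_false]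
          exact ih _ h2
      · have hsw : PySem.Str.startswith line " " = false := by
          rw [← Bool.not_eq_true, pvStartswithSpace, hl]
          simp; intro hh
          subst hh; simp [PySem.Chars.isspace] at hsp
        simp only [hsp, Bool.not_false, if_true]
        simp only [List.filter_cons, hsw, Bool.false_eq_true, if_false]
        exact ih _ h2

-- keys of the width-count loop are exactly the widths seen (plus the start keys)
theorem pvMemKeysFoldl (ws : List Int) (d : PySem.Dict Int Int) (x : Int) :
    x ∈ (ws.foldl (fun d w => d.insert w (d.getD w 0 + 1)) d).keys ↔ x ∈ ws ∨ x ∈ d.keys := by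
  induction ws generalizing d with
  | nil => simp
  | cons w ws ih =>
    rw [List.foldl_cons, ih, PySem.Dict.mem_keys_insert]
    simp [List.mem_cons]
    tauto

-- min? with the identity key depends only on membership
theorem pvMinCongr (xs ys : List Int) (h : ∀ x, x ∈ xs ↔ x ∈ ys) :
    PySem.List.min? xs (fun x => x) = PySem.List.min? ys (fun x => x) := by
  cases hx : PySem.List.min? xs (fun x => x) with
  | none =>
    rw [PySem.List.min?_eq_none_iff] at hx
    subst hx
    cases hy : PySem.List.min? ys (fun x => x) with
    | none => rfl
    | some m =>
      have := PySem.List.min?_mem hy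
      rw [← h] at this
      simp at this
  | some m =>
    cases hy : PySem.List.min? ys (fun x => x) with
    | none =>
      rw [PySem.List.min?_eq_none_iff] at hy
      subst hy
      have := PySem.List.min?_mem hx
      rw [h] at this
      simp at this
    | some m' =>
      have hm := PySem.List.min?_mem hx
      have hm' := PySem.List.min?_mem hy
      have h1 := PySem.List.min?_isMin hx m' ((h m').mpr hm')
      have h2 := PySem.List.min?_isMin hy m ((h m).mp hm)
      simp only at h1 h2
      exact congrArg some (le_antisymm h1 h2)

-- ===== VERDICT (by name: the statement is the Claim_ definition above) =====
theorem detect_code_style_spec : Claim_equal_detect_code_style := by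
  intro source_code _
  unfold Spec_detect_code_style detect_code_style detect_code_style_alt
  by_cases hz : source_code = ""
  · simp [hz]
  · rw [if_neg hz, if_neg hz]
    cases htabs : (PySem.Str.splitlines source_code).any pvTabLine with
    | true =>
      have h1 := pvIndentLoop_tabs (PySem.Str.splitlines source_code) PySem.Dict.empty htabs
      simp only [htabs, if_true, h1]
      simp
    | false =>
      have h1 := pvIndentLoop_noTabs (PySem.Str.splitlines source_code) PySem.Dict.empty htabs
      simp only [htabs, Bool.false_eq_true, if_false, h1]
      set widths := (((PySem.Str.splitlines source_code).filter
        (fun l => PySem.Str.startswith l " ")).map pvWidth) with hw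
      set D : PySem.Dict Int Int := widths.foldl (fun d w => d.insert w (d.getD w 0 + 1)) PySem.Dict.empty with hD
      have hmem : ∀ x, x ∈ D.keys ↔ x ∈ widths := by
        intro x
        rw [hD, pvMemKeysFoldl]
        simp
      have hmin : PySem.List.min? D.keys (fun x => x) = PySem.List.min? widths (fun x => x) :=
        pvMinCongr _ _ hmem
      cases hm : PySem.List.min? widths (fun x => x) with
      | none =>
        rw [PySem.List.min?_eq_none_iff] at hm
        have hk : D.keys = [] := by
          cases hk : D.keys with
          | nil => rfl
          | cons a l =>
            have : a ∈ D.keys := by rw [hk]; simp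
            rw [hmem, hm] at this
            simp at this
        simp [hk]
      | some m =>
        have hne : D.keys ≠ [] := by
          intro hk
          have : m ∈ D.keys := by rw [hmem]; exact PySem.List.min?_mem hm
          rw [hk] at this; simp at this
        simp only [ne_eq]
        rw [if_pos ⟨by simp, hne⟩]
        rw [hmin, hm]
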